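-- pv_equiv track=rewrite | github.com/DanielRoulin/connect4 | board.py | indices_of_win
-- ===== SOURCE A (Python) =====
-- def indices_of_win(array):
--     streak = 1
--     prev = 0
--     for i, n in enumerate(array):
--         if n == prev and n != 0:
--             streak += 1
--         else:
--             streak = 1
--             prev = n
--         if streak == 4:
--             return [i - j for j in range(4)]
--     return []
-- ===== SOURCE B (Python) =====
-- def indices_of_win(array):
--     a = list(array)
--     return next(
--         ([i, i - 1, i - 2, i - 3]
--          for i in range(3, len(a))
--          if a[i] != 0 and a[i] == a[i - 1] == a[i - 2] == a[i - 3]),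
--         [],
--     )
-- ===== Notes on version B (the rewrite author's own statement) =====
-- stated objective: simpler
-- what changed: Replaced A's stateful run-length accumulator (streak/prev carried across the loop) with a stateless sliding-window scan: for each index i from 3 on, directly test whether the four elements a[i-3..i] are equal and nonzero, returning at the first such i.
import Mathlib
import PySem

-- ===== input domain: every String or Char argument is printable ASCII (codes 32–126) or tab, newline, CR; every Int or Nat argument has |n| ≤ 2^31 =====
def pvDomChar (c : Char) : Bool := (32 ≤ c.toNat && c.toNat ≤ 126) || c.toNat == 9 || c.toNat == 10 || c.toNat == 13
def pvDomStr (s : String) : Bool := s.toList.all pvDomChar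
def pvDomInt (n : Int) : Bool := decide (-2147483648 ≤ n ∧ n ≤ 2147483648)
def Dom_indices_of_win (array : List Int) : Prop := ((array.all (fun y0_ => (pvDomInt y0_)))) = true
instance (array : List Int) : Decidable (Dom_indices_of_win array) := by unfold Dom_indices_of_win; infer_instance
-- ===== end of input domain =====

-- B replaces A's stateful streak/prev accumulator with a stateless sliding-window scan over indices; objective: simpler.

-- ===== PORT A =====
-- the for-loop over enumerate(array) with state (streak, prev) and early return
def pvEnumFrom (i : Int) : List Int → List (Int × Int)
  | [] => []
  | x :: xs => (i, x) :: pvEnumFrom (i + 1) xs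

def pvGoA : List (Int × Int) → Int → Int → List Int
  | [], _, _ => []
  | (i, n) :: rest, streak, prev =>
    let s := if n = prev ∧ n ≠ 0 then streak + 1 else 1
    let p := if n = prev ∧ n ≠ 0 then prev else n
    if s = 4 then [i - 0, i - 1, i - 2, i - 3] else pvGoA rest s p

def indices_of_win (array : List Int) : List Int :=
  pvGoA (pvEnumFrom 0 array) 1 0

-- ===== PORT B =====
-- the window test a[i] != 0 and a[i] == a[i-1] == a[i-2] == a[i-3]  (indices drawn from range(3, len(a)) are always in range)
def pvWinAt (a : List Int) (i : Int) : Bool :=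
  decide (PySem.List.pyGetD a i 0 ≠ 0 ∧
          PySem.List.pyGetD a i 0 = PySem.List.pyGetD a (i - 1) 0 ∧
          PySem.List.pyGetD a (i - 1) 0 = PySem.List.pyGetD a (i - 2) 0 ∧
          PySem.List.pyGetD a (i - 2) 0 = PySem.List.pyGetD a (i - 3) 0)

-- next(<gen over range(3, len(a))>, []) = first index passing the window test, else []
def indices_of_win_alt (array : List Int) : List Int :=
  match (PySem.List.pyRange 3 (array.length : Int) 1).find? (pvWinAt array) with
  | some i => [i, i - 1, i - 2, i - 3]
  | none => []

-- ===== PRECONDITION & SPEC =====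
def Spec_indices_of_win (array : List Int) (out : List Int) : Prop := out = indices_of_win_alt array
instance (array : List Int) (out : List Int) : Decidable (Spec_indices_of_win array out) := by unfold Spec_indices_of_win; infer_instance

-- ===== CLAIM (what is proved, stated in full; the proofs are below) =====
def Claim_equal_indices_of_win : Prop := ∀ (array : List Int), Dom_indices_of_win array → Spec_indices_of_win array (indices_of_win array)

-- ===== LEMMAS AND PROOFS =====

-- value of pyGetD at a Nat index
theorem pvGetD_nat (a : List Int) (j : Nat) (h : j < a.length) :
    PySem.List.pyGetD a (j : Int) 0 = a[j] := by
  simp [PySem.List.pyGetD_natCast, List.getElem?_eq_getElem h]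

-- A's loop invariant at position k with state (s, p)
def pvInv (a : List Int) (k : Nat) (s p : Int) : Prop :=
  k ≤ a.length ∧
  (s = 1 ∨ s = 2 ∨ s = 3) ∧
  (k = 0 → s = 1 ∧ p = 0) ∧
  (1 ≤ k → a[k-1]? = some p) ∧
  (2 ≤ s → p ≠ 0 ∧ 2 ≤ k ∧ a[k-2]? = some p) ∧
  (s = 3 → 3 ≤ k ∧ a[k-3]? = some p) ∧
  (s = 1 → 2 ≤ k → ¬(a[k-2]? = some p ∧ p ≠ 0)) ∧
  (s = 2 → 3 ≤ k → a[k-3]? ≠ some p) ∧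
  (∀ i : Nat, 3 ≤ i → i < k → pvWinAt a (i : Int) = false)

theorem pvWinAt_nat (a : List Int) (k : Nat) (h3 : 3 ≤ k) (hk : k < a.length) :
    pvWinAt a (k : Int)
      = decide (a[k] ≠ 0 ∧ a[k] = a[k-1] ∧ a[k-1] = a[k-2] ∧ a[k-2] = a[k-3]) := by
  have e1 : ((k : Int) - 1) = ((k - 1 : Nat) : Int) := by omega
  have e2 : ((k : Int) - 2) = ((k - 2 : Nat) : Int) := by omega
  have e3 : ((k : Int) - 3) = ((k - 3 : Nat) : Int) := by omega
  unfold pvWinAt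
  rw [e1, e2, e3, pvGetD_nat a k hk, pvGetD_nat a (k-1) (by omega),
     pvGetD_nat a (k-2) (by omega), pvGetD_nat a (k-3) (by omega)]

theorem pvFind_none (a : List Int)
    (h : ∀ i : Nat, 3 ≤ i → i < a.length → pvWinAt a (i : Int) = false) :
    (PySem.List.pyRange 3 (a.length : Int) 1).find? (pvWinAt a) = none := by
  apply List.find?_eq_none.2
  intro x hx
  rw [PySem.List.mem_pyRange_one] at hx
  have hx0 : x = ((x.toNat : Nat) : Int) := by omega
  rw [hx0, h x.toNat (by omega) (by omega)]
  simp

theorem pvFind_some (a : List Int) (k : Nat) (hk : k < a.length) (h3 : 3 ≤ k)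
    (hw : pvWinAt a (k : Int) = true)
    (h : ∀ i : Nat, 3 ≤ i → i < k → pvWinAt a (i : Int) = false) :
    (PySem.List.pyRange 3 (a.length : Int) 1).find? (pvWinAt a) = some (k : Int) := by
  rw [PySem.List.pyRange_one_append 3 (k : Int) (a.length : Int) (by omega) (by omega)]
  rw [List.find?_append]
  have h1 : (PySem.List.pyRange 3 (k : Int) 1).find? (pvWinAt a) = none := by
    apply List.find?_eq_none.2
    intro x hx
    rw [PySem.List.mem_pyRange_one] at hx
    have hx0 : x = ((x.toNat : Nat) : Int) := by omega
    rw [hx0, h x.toNat (by omega) (by omega)]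
    simp
  rw [h1]
  rw [PySem.List.pyRange_one_cons (by omega : (k : Int) < (a.length : Int))]
  simp [hw]

-- step lemmas for pvGoA
theorem pvGoA_cons_pos (i n rest streak prev) (h1 : n = prev) (h2 : n ≠ 0) :
    pvGoA ((i, n) :: rest) streak prev =
      if streak + 1 = 4 then [i - 0, i - 1, i - 2, i - 3] else pvGoA rest (streak + 1) prev := by
  subst h1
  simp [pvGoA, h2]

theorem pvGoA_cons_neg (i n rest streak prev) (h : ¬ (n = prev ∧ n ≠ 0)) :
    pvGoA ((i, n) :: rest) streak prev = pvGoA rest 1 n := by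
  simp only [pvGoA, if_neg h]
  norm_num

theorem pvMain (a : List Int) : ∀ (m k : Nat) (s p : Int), a.length - k ≤ m → pvInv a k s p →
    pvGoA (pvEnumFrom (k : Int) (a.drop k)) s p = indices_of_win_alt a := by
  intro m
  induction m with
  | zero =>
    intro k s p hm hInv
    obtain ⟨hkl, _, _, _, _, _, _, _, h8⟩ := hInv
    have hk : k = a.length := by omega
    rw [hk, List.drop_length]
    show pvGoA [] s p = _
    unfold indices_of_win_alt
    rw [pvFind_none a (by rw [← hk]; exact h8)]
    rfl
  | succ m ih =>
    intro k s p hm hInv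
    obtain ⟨hkl, h1, h2, h3, h4, h5, h6, h7, h8⟩ := hInv
    by_cases hk : k < a.length
    · rw [List.drop_eq_getElem_cons hk]
      set n := a[k] with hn
      show pvGoA (((k : Int), n) :: pvEnumFrom ((k : Int) + 1) (a.drop (k+1))) s p = _
      have hek : ((k : Int) + 1) = ((k + 1 : Nat) : Int) := by push_cast; ring
      by_cases hc : n = p ∧ n ≠ 0
      · rw [pvGoA_cons_pos _ _ _ _ _ hc.1 hc.2]
        by_cases hs4 : s + 1 = 4
        · -- the streak fires here: s = 3, window at k holds and none earlier
          rw [if_pos hs4]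
          have hs3 : s = 3 := by omega
          obtain ⟨hk3, hgk3⟩ := h5 hs3
          obtain ⟨hp0, hk2, hgk2⟩ := h4 (by omega)
          have hgk1 := h3 (by omega)
          have hwk : pvWinAt a (k : Int) = true := by
            rw [pvWinAt_nat a k hk3 hk]
            have e1 : a[k-1] = p := by
              have := List.getElem?_eq_getElem (l := a) (i := k-1) (by omega)
              rw [this] at hgk1; exact Option.some.inj hgk1
            have e2 : a[k-2] = p := by
              have := List.getElem?_eq_getElem (l := a) (i := k-2) (by omega)
              rw [this] at hgk2; exact Option.some.inj hgk2
            have e3 : a[k-3] = p := by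
              have := List.getElem?_eq_getElem (l := a) (i := k-3) (by omega)
              rw [this] at hgk3; exact Option.some.inj hgk3
            have hnp : a[k] = p := hc.1
            simp [hnp, e1, e2, e3, hp0]
          unfold indices_of_win_alt
          rw [pvFind_some a k hk hk3 hwk h8]
          simp
        · -- the streak grows: extend the invariant to k+1
          rw [if_neg hs4]
          have hs12 : s = 1 ∨ s = 2 := by omega
          have hknz : 1 ≤ k := by
            by_contra hk0
            have := h2 (by omega)
            exact hc.2 (by rw [hc.1, this.2])
          have hnewInv : pvInv a (k+1) (s+1) p := by
            refine ⟨by omega, by omega, by omega, ?_, ?_, ?_, by omega, ?_, ?_⟩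
            · intro _
              have hg : a[k]? = some n := by rw [hn]; exact List.getElem?_eq_getElem hk
              simpa [hc.1] using hg
            · intro _
              refine ⟨hc.1 ▸ hc.2, by omega, ?_⟩
              have e : k + 1 - 2 = k - 1 := by omega
              rw [e]; exact h3 hknz
            · intro hseq
              have hs2 : s = 2 := by omega
              obtain ⟨hp0, hk2, hgk2⟩ := h4 (by omega)
              refine ⟨by omega, ?_⟩
              have e : k + 1 - 3 = k - 2 := by omega
              rw [e]; exact hgk2
            · intro hseq hk3
              have hs1 : s = 1 := by omega
              have hk2 : 2 ≤ k := by omega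
              have := h6 hs1 hk2
              intro habs
              have e : k + 1 - 3 = k - 2 := by omega
              rw [e] at habs
              exact this ⟨habs, hc.1 ▸ hc.2⟩
            · intro i hi3 hik1
              by_cases hik : i < k
              · exact h8 i hi3 hik
              · have hik' : i = k := by omega
                subst hik'
                rw [pvWinAt_nat a i hi3 hk]
                have hp0 : p ≠ 0 := hc.1 ▸ hc.2
                have e1 : a[i-1] = p := by
                  have hg := h3 hknz
                  have := List.getElem?_eq_getElem (l := a) (i := i-1) (by omega)
                  rw [this] at hg; exact Option.some.inj hg
                rcases hs12 with hs1 | hs2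
                · -- s = 1: a[i-2] ≠ p (or i < 2 is impossible since i ≥ 3)
                  have hne := h6 hs1 (by omega)
                  have hlt : i - 2 < a.length := by omega
                  have hsome := List.getElem?_eq_getElem (l := a) (i := i-2) hlt
                  have e2 : a[i-2] ≠ p := by
                    intro he
                    exact hne ⟨by rw [hsome, he], hp0⟩
                  simp only [decide_eq_false_iff_not]
                  rintro ⟨-, -, hchain, -⟩
                  exact e2 (by rw [← hchain, e1])
                · -- s = 2: a[i-2] = p but a[i-3] ≠ p
                  obtain ⟨-, -, hgk2⟩ := h4 (by omega)
                  have hne3 := h7 hs2 (by omega)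
                  have hlt2 : i - 2 < a.length := by omega
                  have hlt3 : i - 3 < a.length := by omega
                  have e2 : a[i-2] = p := by
                    have := List.getElem?_eq_getElem (l := a) (i := i-2) hlt2
                    rw [this] at hgk2; exact Option.some.inj hgk2
                  have e3 : a[i-3] ≠ p := by
                    intro he
                    exact hne3 (by rw [List.getElem?_eq_getElem (l := a) (i := i-3) hlt3, he])
                  simp only [decide_eq_false_iff_not]
                  rintro ⟨-, -, -, hchain⟩
                  exact e3 (by rw [← hchain, e2])
          rw [hek]
          exact ih (k+1) (s+1) p (by omega) hnewInv
      · -- reset: state becomes (1, n)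
        rw [pvGoA_cons_neg _ _ _ _ _ hc]
        have hnewInv : pvInv a (k+1) 1 n := by
          refine ⟨by omega, by omega, by omega, ?_, by omega, by omega, ?_, by omega, ?_⟩
          · intro _
            have hg : a[k]? = some n := by rw [hn]; exact List.getElem?_eq_getElem hk
            simpa using hg
          · intro _ hk2
            rintro ⟨hg, hn0⟩
            have hg' := h3 (by omega : 1 ≤ k)
            have : n = p := by
              have h1' : a[k-1]? = some n := by simpa using hg
              rw [h1'] at hg'
              exact Option.some.inj hg'
            exact hc ⟨this, hn0⟩
          · intro i hi3 hik1
            by_cases hik : i < k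
            · exact h8 i hi3 hik
            · have hik' : i = k := by omega
              subst hik'
              rw [pvWinAt_nat a i hi3 hk]
              have hg := h3 (by omega : 1 ≤ i)
              have e1 : a[i-1] = p := by
                have := List.getElem?_eq_getElem (l := a) (i := i-1) (by omega)
                rw [this] at hg; exact Option.some.inj hg
              simp only [decide_eq_false_iff_not]
              rintro ⟨hnz, hchain, -, -⟩
              exact hc ⟨by rw [hn, hchain, e1], by rw [hn]; exact hnz⟩
        rw [hek]
        exact ih (k+1) 1 n (by omega) hnewInv
    · have hk' : k = a.length := by omega
      rw [hk', List.drop_length]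
      show pvGoA [] s p = _
      unfold indices_of_win_alt
      rw [pvFind_none a (by rw [← hk']; exact h8)]
      rfl

-- ===== VERDICT (by name: the statement is the Claim_ definition above) =====
theorem indices_of_win_spec : Claim_equal_indices_of_win := by
  intro array _
  show indices_of_win array = indices_of_win_alt array
  unfold indices_of_win
  have h0 : pvInv array 0 1 0 := by
    refine ⟨Nat.zero_le _, Or.inl rfl, fun _ => ⟨rfl, rfl⟩, by omega, by omega, by omega,
      by omega, by omega, by omega⟩
  simpa using pvMain array array.length 0 1 0 (by omega) h0
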